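-- pv_equiv track=rewrite | github.com/caolele/adhoc-stuff | peak/counting-valleys.py | getSeaLevelIdx
-- ===== SOURCE A (Python) =====
-- def getSeaLevelIdx(n, s):
--     result = [-1]
--     running_sum = 0
--     for i in range(n):
--         if s[i] == "D":
--             running_sum -= 1
--         elif s[i] == "U":
--             running_sum += 1
--         else:
--             raise RuntimeError("illegal character in input!")
--         if running_sum == 0:
--             result.append(i)
--     return result
-- ===== SOURCE B (Python) =====
-- def getSeaLevelIdx(n, s):
--     result = [-1]
--     stack = []
--     for i in range(n):
--         c = s[i]
--         if c != "U" and c != "D":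
--             raise RuntimeError("illegal character in input!")
--         if stack and stack[-1] != c:
--             stack.pop()
--         else:
--             stack.append(c)
--         if not stack:
--             result.append(i)
--     return result
-- ===== Notes on version B (the rewrite author's own statement) =====
-- stated objective: alternative
-- what changed: A maintains an integer altitude counter and tests it for zero; B instead maintains a cancellation stack of unmatched steps (an opposite step pops, a like step pushes) and records the indices where the stack becomes empty.
import Mathlib
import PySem

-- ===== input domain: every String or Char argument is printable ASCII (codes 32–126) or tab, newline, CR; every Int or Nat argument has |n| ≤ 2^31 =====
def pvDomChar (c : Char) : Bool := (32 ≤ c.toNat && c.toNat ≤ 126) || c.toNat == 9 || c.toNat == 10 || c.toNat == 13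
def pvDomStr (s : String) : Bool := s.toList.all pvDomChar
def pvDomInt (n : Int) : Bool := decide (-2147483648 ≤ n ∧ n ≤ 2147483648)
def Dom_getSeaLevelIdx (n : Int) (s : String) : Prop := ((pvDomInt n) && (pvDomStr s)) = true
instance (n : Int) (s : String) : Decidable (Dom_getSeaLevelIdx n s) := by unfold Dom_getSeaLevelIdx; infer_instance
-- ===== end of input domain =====

-- B replaces A's integer altitude counter by a cancellation stack of unmatched steps
-- (opposite step pops, like step pushes; record i when the stack empties); objective: alternative, not speed.

-- ===== PORT A =====
-- A's loop body; Option state (result, running_sum); none = the RuntimeError/IndexError A raises (excluded by Pre_).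
def stepAo (s : String) (st : Option (List Int × Int)) (i : Int) : Option (List Int × Int) :=
  st.bind (fun p =>
    match PySem.Str.pyGet? s i with
    | some c =>
      if c = 'D' then
        some (if p.2 - 1 = 0 then p.1 ++ [i] else p.1, p.2 - 1)
      else if c = 'U' then
        some (if p.2 + 1 = 0 then p.1 ++ [i] else p.1, p.2 + 1)
      else none
    | none => none)

def getSeaLevelIdx (n : Int) (s : String) : List Int :=
  (((PySem.List.pyRange 0 n 1).foldl (stepAo s) (some (([-1] : List Int), (0 : Int)))).map
    Prod.fst).getD [-1]

-- ===== PORT B =====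
-- the stack update: pop on an opposite top, push otherwise (head = Python's stack[-1])
def stackStep (c : Char) (stk : List Char) : List Char :=
  match stk with
  | [] => [c]
  | x :: rest => if x ≠ c then rest else c :: (x :: rest)

-- B's loop body; Option state (result, stack); none = the RuntimeError/IndexError Source B raises (excluded by Pre_).
def stepBo (s : String) (st : Option (List Int × List Char)) (i : Int) : Option (List Int × List Char) :=
  st.bind (fun p =>
    match PySem.Str.pyGet? s i with
    | some c =>
      if c ≠ 'U' ∧ c ≠ 'D' then none
      else
        let stk := stackStep c p.2
        some (if stk = [] then p.1 ++ [i] else p.1, stk)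
    | none => none)

def getSeaLevelIdx_alt (n : Int) (s : String) : List Int :=
  (((PySem.List.pyRange 0 n 1).foldl (stepBo s) (some (([-1] : List Int), ([] : List Char)))).map
    Prod.fst).getD [-1]

-- ===== PRECONDITION & SPEC =====
-- Pre_: exactly the inputs where Python A returns (no IndexError from n > len(s), no RuntimeError from a non-'U'/'D' char among the first n).
def Pre_getSeaLevelIdx (n : Int) (s : String) : Prop :=
  n ≤ (s.toList.length : Int) ∧ (s.toList.take n.toNat).all (fun c => c == 'U' || c == 'D') = true
instance (n : Int) (s : String) : Decidable (Pre_getSeaLevelIdx n s) := by unfold Pre_getSeaLevelIdx; infer_instance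
def pvWitness_getSeaLevelIdx : Int × String := (4, "UDDU")

def Spec_getSeaLevelIdx (n : Int) (s : String) (out : List Int) : Prop := out = getSeaLevelIdx_alt n s
instance (n : Int) (s : String) (out : List Int) : Decidable (Spec_getSeaLevelIdx n s out) := by unfold Spec_getSeaLevelIdx; infer_instance

-- ===== CLAIM (what is proved, stated in full; the proofs are below) =====
def Claim_equal_getSeaLevelIdx : Prop := ∀ (n : Int) (s : String), Dom_getSeaLevelIdx n s → Pre_getSeaLevelIdx n s → Spec_getSeaLevelIdx n s (getSeaLevelIdx n s)

-- ===== LEMMAS AND PROOFS =====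

-- the stack B maintains, as a function of A's running sum
def encode (t : Int) : List Char :=
  if 0 ≤ t then List.replicate t.toNat 'U' else List.replicate (-t).toNat 'D'

theorem encode_eq_nil (t : Int) : encode t = [] ↔ t = 0 := by
  unfold encode; split_ifs with h <;> simp [List.replicate_eq_nil_iff] <;> omega

theorem stackStep_push (c : Char) (m : Nat) :
    stackStep c (List.replicate m c) = List.replicate (m + 1) c := by
  cases m with
  | zero => rfl
  | succ k => simp [List.replicate_succ, stackStep]

theorem stackStep_pop (c c' : Char) (hc : ¬ c' = c) (k : Nat) :
    stackStep c (List.replicate (k + 1) c') = List.replicate k c' := by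
  simp [List.replicate_succ, stackStep, hc]

theorem stackStep_U (t : Int) : stackStep 'U' (encode t) = encode (t + 1) := by
  unfold encode
  by_cases h : 0 ≤ t
  · rw [if_pos h, if_pos (by omega : (0:Int) ≤ t + 1), stackStep_push]
    congr 1; omega
  · rw [if_neg h]
    have h1 : (-t).toNat = (-(t + 1)).toNat + 1 := by omega
    rw [h1, stackStep_pop _ _ (by decide)]
    by_cases h2 : 0 ≤ t + 1
    · have ht : t = -1 := by omega
      subst ht; simp
    · rw [if_neg h2]

theorem stackStep_D (t : Int) : stackStep 'D' (encode t) = encode (t - 1) := by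
  unfold encode
  by_cases h : 0 ≤ t - 1
  · rw [if_pos (by omega : (0:Int) ≤ t), if_pos h]
    have h1 : t.toNat = (t - 1).toNat + 1 := by omega
    rw [h1, stackStep_pop _ _ (by decide)]
  · rw [if_neg h]
    by_cases h2 : 0 ≤ t
    · have ht : t = 0 := by omega
      subst ht; simp [stackStep]
    · rw [if_neg h2]
      have h1 : (-(t - 1)).toNat = (-t).toNat + 1 := by omega
      rw [h1, ← stackStep_push]

theorem fold_none_A (s : String) (l : List Int) : l.foldl (stepAo s) none = none := by
  induction l with
  | nil => rfl
  | cons a l ih => simpa [stepAo] using ih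

theorem fold_none_B (s : String) (l : List Int) : l.foldl (stepBo s) none = none := by
  induction l with
  | nil => rfl
  | cons a l ih => simpa [stepBo] using ih

-- the two folds run in lock-step: B's state is the image of A's state under encode
theorem fold_rel (s : String) (l : List Int) :
    ∀ (res : List Int) (t : Int),
      l.foldl (stepBo s) (some (res, encode t))
        = (l.foldl (stepAo s) (some (res, t))).map (fun p => (p.1, encode p.2)) := by
  induction l with
  | nil => intro res t; rfl
  | cons i l ih =>
    intro res t
    rw [List.foldl_cons, List.foldl_cons]
    have e1 : PySem.Str.pyGet? s i = PySem.List.pyGet? s.toList i := rfl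
    simp only [stepAo, stepBo, Option.bind_some, e1]
    cases hg : PySem.List.pyGet? s.toList i with
    | none => simp [fold_none_A, fold_none_B]
    | some c =>
      by_cases hD : c = 'D'
      · subst hD
        simp only [show ¬(¬('D' : Char) = 'U' ∧ ¬('D' : Char) = 'D') by decide,
          stackStep_D, encode_eq_nil]
        exact ih _ _
      · by_cases hU : c = 'U'
        · subst hU
          simp only [if_neg (by decide : ¬('U' : Char) = 'D'),
            show ¬(¬('U' : Char) = 'U' ∧ ¬('U' : Char) = 'D') by decide,
            stackStep_U, encode_eq_nil]
          exact ih _ _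
        · simp [hD, hU, fold_none_A, fold_none_B]

-- ===== VERDICT (by name: the statement is the Claim_ definition above) =====
theorem getSeaLevelIdx_spec : Claim_equal_getSeaLevelIdx := by
  unfold Claim_equal_getSeaLevelIdx
  intro n s _hdom _hpre
  unfold Spec_getSeaLevelIdx getSeaLevelIdx getSeaLevelIdx_alt
  have h0 : (([] : List Char)) = encode 0 := by simp [encode]
  rw [h0, fold_rel]
  cases (PySem.List.pyRange 0 n 1).foldl (stepAo s) (some (([-1] : List Int), (0 : Int))) <;> rfl
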